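-- pv_equiv track=rewrite | github.com/pm4py/pm4py-core | pm4py/objects/dfg/utils/dfg_utils.py | infer_start_activities_from_prev_connections_and_current_dfg
-- ===== SOURCE A (Python) =====
-- def get_outgoing_edges(dfg):
--     """
--     Gets outgoing edges of the provided DFG graph
--     """
--     outgoing = {}
--     for el in dfg:
--         if type(el[0]) is str:
--             if not el[0] in outgoing:
--                 outgoing[el[0]] = {}
--             outgoing[el[0]][el[1]] = dfg[el]
--         else:
--             if not el[0][0] in outgoing:
--                 outgoing[el[0][0]] = {}
--             outgoing[el[0][0]][el[0][1]] = el[1]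
--     return outgoing
--
-- def get_ingoing_edges(dfg):
--     """
--     Get ingoing edges of the provided DFG graph
--     """
--     ingoing = {}
--     for el in dfg:
--         if type(el[0]) is str:
--             if not el[1] in ingoing:
--                 ingoing[el[1]] = {}
--             ingoing[el[1]][el[0]] = dfg[el]
--         else:
--             if not el[0][1] in ingoing:
--                 ingoing[el[0][1]] = {}
--             ingoing[el[0][1]][el[0][0]] = el[1]
--     return ingoing
--
-- def infer_start_activities(dfg):
--     """
--     Infer start activities from a Directly-Follows Graph
--
--     Parameters
--     ----------
--     dfg
--         Directly-Follows Graph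
--
--     Returns
--     ----------
--     start_activities
--         Start activities in the log
--     """
--     ingoing = get_ingoing_edges(dfg)
--     outgoing = get_outgoing_edges(dfg)
--
--     start_activities = []
--
--     for act in outgoing:
--         if act not in ingoing:
--             start_activities.append(act)
--
--     return start_activities
--
-- def infer_start_activities_from_prev_connections_and_current_dfg(initial_dfg, dfg, activities, include_self=True):
--     """
--     Infer the start activities from the previous connections
--
--     Parameters
--     -----------
--     initial_dfg
--         Initial DFG
--     dfg
--         Directly-follows graph
--     activities
--         List of the activities contained in DFG
--     """
--     start_activities = set()
--     for el in initial_dfg: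
--         if el[0][1] in activities and not el[0][0] in activities:
--             start_activities.add(el[0][1])
--     if include_self:
--         start_activities = start_activities.union(
--             set(infer_start_activities(dfg)))
--     return start_activities
-- ===== SOURCE B (Python) =====
-- def infer_start_activities_from_prev_connections_and_current_dfg(initial_dfg, dfg, activities, include_self=True):
--     """
--     Infer the start activities from the previous connections
--     """
--     start_activities = set()
--     for el in initial_dfg:
--         if el[0][1] in activities and not el[0][0] in activities:
--             start_activities.add(el[0][1])
--     if include_self:
--         # a node starts the current dfg iff no edge of the dfg ends in it:
--         # test each edge's source directly against every edge's target,
--         # without building any adjacency dictionaries or node sets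
--         for source, _ in dfg:
--             if all(target != source for _, target in dfg):
--                 start_activities.add(source)
--     return start_activities
-- ===== Notes on version B (the rewrite author's own statement) =====
-- stated objective: simpler
-- what changed: The include_self branch drops the two nested weighted adjacency dictionaries (get_ingoing_edges/get_outgoing_edges plus a key scan) and instead tests each dfg edge's source directly against every edge's target with an all(...) scan, adding sources with no incoming edge; no index structure of any kind is built.
import Mathlib
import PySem

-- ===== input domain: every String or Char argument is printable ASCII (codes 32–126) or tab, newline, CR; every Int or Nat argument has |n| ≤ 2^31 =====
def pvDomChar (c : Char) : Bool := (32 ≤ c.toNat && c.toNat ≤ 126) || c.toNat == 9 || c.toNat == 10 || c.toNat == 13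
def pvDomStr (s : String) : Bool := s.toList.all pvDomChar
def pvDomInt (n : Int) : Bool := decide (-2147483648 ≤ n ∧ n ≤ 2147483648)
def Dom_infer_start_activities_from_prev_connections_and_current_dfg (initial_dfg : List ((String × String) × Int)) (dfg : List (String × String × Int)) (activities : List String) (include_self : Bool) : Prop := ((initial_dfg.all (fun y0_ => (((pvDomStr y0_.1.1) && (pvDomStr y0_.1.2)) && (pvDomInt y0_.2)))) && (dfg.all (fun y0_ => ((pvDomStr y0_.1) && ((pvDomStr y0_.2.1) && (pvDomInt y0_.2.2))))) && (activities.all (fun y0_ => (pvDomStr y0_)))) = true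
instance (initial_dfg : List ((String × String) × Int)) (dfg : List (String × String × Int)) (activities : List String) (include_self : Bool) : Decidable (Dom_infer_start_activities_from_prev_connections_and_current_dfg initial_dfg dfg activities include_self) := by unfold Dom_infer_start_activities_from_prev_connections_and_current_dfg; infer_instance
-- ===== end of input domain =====

-- B's include_self branch drops A's two nested adjacency dictionaries and instead tests
-- each dfg edge's source directly against every edge's target (an all(...) scan), adding
-- sources with no incoming edge; objective: simpler (no index structure built).

-- The Python parameter dfg is a dict[(str,str), int], represented here as an association
-- list; both ports decode it once with Dict.ofList (insertion order, a duplicate key keeps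
-- its first position and last value, exactly Python's dict()).
def dfgDict (dfg : List (String × String × Int)) : PySem.Dict (String × String) Int :=
  PySem.Dict.ofList (dfg.map (fun el => ((el.1, el.2.1), el.2.2)))

-- ===== PORT A =====
-- `for el in dfg` on a dict iterates its KEYS, so el is a (str,str) tuple and el[0] is a
-- str: Python always takes the first branch (the tuple-element branch is unreachable for
-- this input type and has no code to port). `dfg[el]` with el a key of dfg never raises;
-- the 0 default of getD is unreachable.
def get_outgoing_edges (dfg : PySem.Dict (String × String) Int) : PySem.Dict String (PySem.Dict String Int) :=
  dfg.keys.foldl (fun outgoing el =>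
    let outgoing := if !(outgoing.contains el.1) then outgoing.insert el.1 PySem.Dict.empty else outgoing
    outgoing.modify el.1 PySem.Dict.empty (fun d => d.insert el.2 (dfg.getD el 0)))
    PySem.Dict.empty

def get_ingoing_edges (dfg : PySem.Dict (String × String) Int) : PySem.Dict String (PySem.Dict String Int) :=
  dfg.keys.foldl (fun ingoing el =>
    let ingoing := if !(ingoing.contains el.2) then ingoing.insert el.2 PySem.Dict.empty else ingoing
    ingoing.modify el.2 PySem.Dict.empty (fun d => d.insert el.1 (dfg.getD el 0)))
    PySem.Dict.empty

def infer_start_activities (dfg : PySem.Dict (String × String) Int) : List String :=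
  let ingoing := get_ingoing_edges dfg
  let outgoing := get_outgoing_edges dfg
  outgoing.keys.foldl (fun start_activities act =>
    if !(ingoing.contains act) then start_activities ++ [act] else start_activities) []

def infer_start_activities_from_prev_connections_and_current_dfg (initial_dfg : List ((String × String) × Int)) (dfg : List (String × String × Int)) (activities : List String) (include_self : Bool) : List String :=
  let start_activities : PySem.Set String :=
    initial_dfg.foldl (fun s el =>
      if activities.contains el.1.2 && !(activities.contains el.1.1) then PySem.Set.add s el.1.2 else s)
      PySem.Set.empty
  if include_self then
    PySem.Set.union start_activities (PySem.Set.ofList (infer_start_activities (dfgDict dfg)))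
  else start_activities

-- ===== PORT B =====
def infer_start_activities_from_prev_connections_and_current_dfg_alt (initial_dfg : List ((String × String) × Int)) (dfg : List (String × String × Int)) (activities : List String) (include_self : Bool) : List String :=
  let start_activities : PySem.Set String :=
    initial_dfg.foldl (fun s el =>
      if activities.contains el.1.2 && !(activities.contains el.1.1) then PySem.Set.add s el.1.2 else s)
      PySem.Set.empty
  if include_self then
    let ks := (dfgDict dfg).keys
    ks.foldl (fun s el =>
      if ks.all (fun e2 => !(e2.2 == el.1)) then PySem.Set.add s el.1 else s)
      start_activities
  else start_activities

-- ===== PRECONDITION & SPEC =====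
def Spec_infer_start_activities_from_prev_connections_and_current_dfg (initial_dfg : List ((String × String) × Int)) (dfg : List (String × String × Int)) (activities : List String) (include_self : Bool) (out : List String) : Prop := out = infer_start_activities_from_prev_connections_and_current_dfg_alt initial_dfg dfg activities include_self
instance (initial_dfg : List ((String × String) × Int)) (dfg : List (String × String × Int)) (activities : List String) (include_self : Bool) (out : List String) : Decidable (Spec_infer_start_activities_from_prev_connections_and_current_dfg initial_dfg dfg activities include_self out) := by unfold Spec_infer_start_activities_from_prev_connections_and_current_dfg; infer_instance

-- ===== CLAIM (what is proved, stated in full; the proofs are below) =====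
def Claim_equal_infer_start_activities_from_prev_connections_and_current_dfg : Prop := ∀ (initial_dfg : List ((String × String) × Int)) (dfg : List (String × String × Int)) (activities : List String) (include_self : Bool), Dom_infer_start_activities_from_prev_connections_and_current_dfg initial_dfg dfg activities include_self → Spec_infer_start_activities_from_prev_connections_and_current_dfg initial_dfg dfg activities include_self (infer_start_activities_from_prev_connections_and_current_dfg initial_dfg dfg activities include_self)

-- ===== LEMMAS AND PROOFS =====

-- One step of A's setdefault-then-assign dictionary loop only adds the key to the key list.
lemma keys_sd_step (o : PySem.Dict String (PySem.Dict String Int)) (k : String)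
    (f : PySem.Dict String Int → PySem.Dict String Int) :
    ((if !(o.contains k) then o.insert k PySem.Dict.empty else o).modify k PySem.Dict.empty f).keys
      = PySem.Set.add o.keys k := by
  rw [PySem.Dict.keys_modify]
  split_ifs with h
  · rw [PySem.Dict.insert_insert_self, PySem.Dict.keys_insert_of_not_contains o _ (by simpa using h)]
    have h' : k ∉ o.keys := by
      simpa [PySem.Dict.contains_eq_decide_mem_keys] using h
    simp [PySem.Set.add, PySem.Set.contains, h']
  · rw [PySem.Dict.keys_insert_of_contains o _ (by simpa using h)]
    have h' : k ∈ o.keys := by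
      have : o.contains k = true := by simpa using h
      simpa [PySem.Dict.contains_eq_decide_mem_keys] using this
    simp [PySem.Set.add, PySem.Set.contains, h']

-- The keys of A's whole adjacency-building loop are the Set.update of the extracted keys.
lemma keys_sd_loop (K : List (String × String)) (key : String × String → String)
    (f : String × String → PySem.Dict String Int → PySem.Dict String Int)
    (o : PySem.Dict String (PySem.Dict String Int)) :
    (K.foldl (fun o el =>
      (if !(o.contains (key el)) then o.insert (key el) PySem.Dict.empty else o).modify
        (key el) PySem.Dict.empty (f el)) o).keys
      = PySem.Set.update o.keys (K.map key) := by
  induction K generalizing o with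
  | nil => simp [PySem.Set.update]
  | cons x xs ih =>
    simp only [List.foldl_cons, List.map_cons, PySem.Set.update] at *
    rw [ih, keys_sd_step]

lemma keys_outgoing (d : PySem.Dict (String × String) Int) :
    (get_outgoing_edges d).keys = PySem.Set.ofList (d.keys.map (fun el => el.1)) := by
  simpa [PySem.Set.ofList, PySem.Set.update, get_outgoing_edges] using
    keys_sd_loop d.keys (fun el => el.1) (fun el m => m.insert el.2 (d.getD el 0)) PySem.Dict.empty

lemma keys_ingoing (d : PySem.Dict (String × String) Int) :
    (get_ingoing_edges d).keys = PySem.Set.ofList (d.keys.map (fun el => el.2)) := by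
  simpa [PySem.Set.ofList, PySem.Set.update, get_ingoing_edges] using
    keys_sd_loop d.keys (fun el => el.2) (fun el m => m.insert el.1 (d.getD el 0)) PySem.Dict.empty

-- A's start-activity scan over the current dfg: the filter form.
lemma infer_eq_filter (d : PySem.Dict (String × String) Int) :
    infer_start_activities d
      = (PySem.Set.ofList (d.keys.map (fun el => el.1))).filter
          (fun a => !((d.keys.map (fun el => el.2)).contains a)) := by
  unfold infer_start_activities
  rw [PySem.List.foldl_append_if_eq_filter, keys_outgoing, List.nil_append]
  apply List.filter_congr
  intro a _
  simp [PySem.Dict.contains_eq_decide_mem_keys, keys_ingoing, PySem.Set.mem_ofList]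

-- set(...) commutes with an element-wise filter (dedup keeps first occurrences either way).
lemma ofList_filter {α : Type} [BEq α] [LawfulBEq α] (q : α → Bool) (l : List α) :
    PySem.Set.ofList (l.filter q) = (PySem.Set.ofList l).filter q := by
  induction l using List.reverseRecOn with
  | nil => rfl
  | append_singleton xs x ih =>
    rw [List.filter_append, PySem.Set.ofList_append_singleton]
    by_cases hq : q x = true
    · rw [List.filter_cons, if_pos hq, List.filter_nil, PySem.Set.ofList_append_singleton, ih]
      by_cases hm : x ∈ PySem.Set.ofList xs
      · rw [PySem.Set.add_of_mem hm, PySem.Set.add_of_mem (by simp [List.mem_filter, hm, hq])]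
      · rw [PySem.Set.add_of_not_mem hm,
          PySem.Set.add_of_not_mem (by
            simp only [PySem.Set.mem_ofList, List.mem_filter, hq, and_true]
            simpa [PySem.Set.mem_ofList] using hm),
          List.filter_append, List.filter_cons, if_pos hq, List.filter_nil]
    · rw [List.filter_cons, if_neg hq, List.filter_nil, List.append_nil, ih,
        PySem.Set.add_eq_ite]
      by_cases hm : x ∈ PySem.Set.ofList xs
      · rw [if_pos hm]
      · rw [if_neg hm, List.filter_append, List.filter_cons, if_neg hq, List.filter_nil,
          List.append_nil]

-- B's all(...) edge test is exactly "source not among the targets".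
lemma all_ne_eq_not_contains {α β : Type} [BEq β] [LawfulBEq β] (l : List α) (f : α → β) (a : β) :
    l.all (fun b => !(f b == a)) = !((l.map f).contains a) := by
  induction l with
  | nil => rfl
  | cons x xs ih =>
    simp only [List.all_cons, List.map_cons, List.contains_cons, ih, Bool.not_or]
    by_cases h : f x = a
    · simp [h]
    · have h1 : (a == f x) = false := beq_eq_false_iff_ne.mpr (fun he => h he.symm)
      have h2 : (f x == a) = false := beq_eq_false_iff_ne.mpr h
      simp [h1, h2]

-- a conditional-add loop is Set.update with the filtered, mapped list.
lemma foldl_add_if_eq_update {α β : Type} [BEq β] [LawfulBEq β] (p : α → Bool) (f : α → β)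
    (l : List α) (s : PySem.Set β) :
    l.foldl (fun s el => if p el then PySem.Set.add s (f el) else s) s
      = PySem.Set.update s ((l.filter p).map f) := by
  rw [PySem.List.foldl_if_eq_foldl_filter, PySem.Set.update_map_eq_foldl_add]

-- filtering on a projection commutes with mapping that projection out.
lemma map_fst_filter {α β : Type} (q : β → Bool) (f : α → β) (l : List α) :
    (l.filter (fun el => q (f el))).map f = (l.map f).filter q := by
  induction l with
  | nil => rfl
  | cons x xs ih =>
    by_cases h : q (f x) = true <;> simp [h, ih]

-- the elements B's scan adds are exactly A's inferred start activities, as a set.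
lemma key_scan_eq (d : PySem.Dict (String × String) Int) :
    PySem.Set.ofList
        (((d.keys.filter (fun el => d.keys.all (fun e2 => !(e2.2 == el.1)))).map (fun el => el.1)))
      = PySem.Set.ofList (infer_start_activities d) := by
  have h1 : d.keys.filter (fun el => d.keys.all (fun e2 => !(e2.2 == el.1)))
      = d.keys.filter (fun el => !((d.keys.map (fun e2 => e2.2)).contains el.1)) :=
    List.filter_congr (fun el _ => all_ne_eq_not_contains d.keys (fun e2 => e2.2) el.1)
  rw [h1,
    map_fst_filter (fun a => !((d.keys.map (fun e2 => e2.2)).contains a)) (fun el => el.1) d.keys,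
    ofList_filter, ← infer_eq_filter,
    PySem.Set.ofList_eq_self_of_nodup _ (by rw [infer_eq_filter]; exact (PySem.Set.nodup_ofList _).filter _)]

-- B's include_self scan over the dfg keys equals A's union with the inferred start activities.
lemma branch_eq (d : PySem.Dict (String × String) Int) (S : PySem.Set String) :
    d.keys.foldl (fun s el =>
        if d.keys.all (fun e2 => !(e2.2 == el.1)) then PySem.Set.add s el.1 else s) S
      = PySem.Set.union S (PySem.Set.ofList (infer_start_activities d)) := by
  rw [foldl_add_if_eq_update (fun el => d.keys.all (fun e2 => !(e2.2 == el.1))) (fun el => el.1) d.keys S,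
    show (PySem.Set.union : PySem.Set String → List String → PySem.Set String) = PySem.Set.update from rfl,
    PySem.Set.update_eq_append_filter, PySem.Set.update_eq_append_filter,
    PySem.Set.ofList_ofList, key_scan_eq]

-- ===== VERDICT (by name: the statement is the Claim_ definition above) =====
theorem infer_start_activities_from_prev_connections_and_current_dfg_spec : Claim_equal_infer_start_activities_from_prev_connections_and_current_dfg := by
  intro initial_dfg dfg activities include_self _
  unfold Spec_infer_start_activities_from_prev_connections_and_current_dfg
  unfold infer_start_activities_from_prev_connections_and_current_dfg
  unfold infer_start_activities_from_prev_connections_and_current_dfg_alt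
  cases include_self with
  | false => rfl
  | true => exact (branch_eq (dfgDict dfg) _).symm
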